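-- pv_equiv track=rewrite | github.com/juandarr/ProjectEuler | 117.py | colored_block_counting
-- ===== SOURCE A (Python) =====
-- def colored_block_counting(limit_n):
--     '''
--     returns the number of ways to fill a n block row
--     '''
--     n = 1
--     variations = {}
--     while n<=limit_n:
--         counter = 1
--         for block in range(2,5):
--             for idx in range(n-block+1):
--                 counter +=1
--                 if n-(block+idx)>=2:
--                     counter += variations[n-(block+idx)]
--         variations[n]=counter-1
--         n +=1
--     return counter
-- ===== SOURCE B (Python) =====
-- def colored_block_counting(limit_n):
--     '''
--     returns the number of ways to fill a n block row
--     '''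
--     a, b, c, d = 0, 0, 0, 1
--     for _ in range(limit_n):
--         a, b, c, d = b, c, d, a + b + c + d
--     return d
-- ===== Notes on version B (the rewrite author's own statement) =====
-- stated objective: faster
-- what changed: Replaces the quadratic double loop over block sizes and offsets with a dictionary of all earlier values by the linear recurrence a(n)=a(n-1)+a(n-2)+a(n-3)+a(n-4) kept in a rolling 4-value window.
-- crash fix: For limit_n < 1 A raises NameError (counter is never assigned); B returns 1, the one way to tile an empty row. — e.g. on colored_block_counting(0): A raises UnboundLocalError, B returns 1
import Mathlib
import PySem

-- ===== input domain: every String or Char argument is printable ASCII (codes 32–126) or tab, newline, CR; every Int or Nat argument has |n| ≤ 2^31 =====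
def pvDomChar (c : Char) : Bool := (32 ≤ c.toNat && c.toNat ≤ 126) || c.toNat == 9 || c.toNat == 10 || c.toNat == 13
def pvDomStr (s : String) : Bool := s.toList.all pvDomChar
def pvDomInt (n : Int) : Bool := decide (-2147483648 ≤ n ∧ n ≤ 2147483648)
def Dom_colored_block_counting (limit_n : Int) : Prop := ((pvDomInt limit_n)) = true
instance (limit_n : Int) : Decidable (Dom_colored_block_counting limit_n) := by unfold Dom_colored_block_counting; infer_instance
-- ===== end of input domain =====

-- B replaces A's quadratic double loop over (block, idx) with the linear recurrence
-- a(n)=a(n-1)+a(n-2)+a(n-3)+a(n-4) kept in a rolling 4-value window (objective: faster).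

-- ===== PORT A =====
-- counter = 1; for block in range(2,5): for idx in range(n-block+1): …
def pvAInner (n : Int) (variations : PySem.Dict Int Int) : Int :=
  (PySem.List.pyRange 2 5 1).foldl (fun counter block =>
    (PySem.List.pyRange 0 (n - block + 1) 1).foldl (fun counter idx =>
      let counter := counter + 1
      if n - (block + idx) ≥ 2 then counter + variations.getD (n - (block + idx)) 0
      else counter) counter) 1

-- while n <= limit_n: … ; the fuel is the exact number of iterations, limit_n.toNat
def pvALoop : Nat → Int → PySem.Dict Int Int → Int → Int
  | 0, _, _, counter => counter
  | fuel+1, n, variations, _ =>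
    let counter := pvAInner n variations
    pvALoop fuel (n + 1) (variations.insert n (counter - 1)) counter

-- the initial 0 stands for Python's unassigned `counter`; it is only returned when
-- limit_n < 1, where Python raises NameError (excluded by Pre_)
def colored_block_counting (limit_n : Int) : Int :=
  pvALoop limit_n.toNat 1 PySem.Dict.empty 0

-- ===== PORT B =====
-- a, b, c, d = b, c, d, a+b+c+d
def pvBStep (w : Int × Int × Int × Int) : Int × Int × Int × Int :=
  (w.2.1, w.2.2.1, w.2.2.2, w.1 + w.2.1 + w.2.2.1 + w.2.2.2)

def colored_block_counting_alt (limit_n : Int) : Int :=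
  ((PySem.List.pyRange 0 limit_n 1).foldl (fun w _ => pvBStep w)
    ((0, 0, 0, 1) : Int × Int × Int × Int)).2.2.2

-- ===== PRECONDITION & SPEC =====
-- Pre_ excludes limit_n < 1, where Python A raises NameError (`counter` never assigned)
def Pre_colored_block_counting (limit_n : Int) : Prop := 1 ≤ limit_n
instance (limit_n : Int) : Decidable (Pre_colored_block_counting limit_n) := by
  unfold Pre_colored_block_counting; infer_instance

def pvWitness_colored_block_counting : Int := 3

-- For limit_n < 1 A raises NameError (counter is never assigned); B returns 1, the one way to tile an empty row.
def Raises_colored_block_counting (limit_n : Int) : Prop := limit_n < 1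
instance (limit_n : Int) : Decidable (Raises_colored_block_counting limit_n) := by
  unfold Raises_colored_block_counting; infer_instance
def pvRaiseWitness_colored_block_counting : Int := 0
def pvRaiseWitnessOut_colored_block_counting : Int := 1

def Spec_colored_block_counting (limit_n : Int) (out : Int) : Prop :=
  out = colored_block_counting_alt limit_n
instance (limit_n : Int) (out : Int) : Decidable (Spec_colored_block_counting limit_n out) := by
  unfold Spec_colored_block_counting; infer_instance

-- ===== CLAIM (what is proved, stated in full; the proofs are below) =====
def Claim_equal_colored_block_counting : Prop :=
  ∀ (limit_n : Int), Dom_colored_block_counting limit_n →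
    Pre_colored_block_counting limit_n →
    Spec_colored_block_counting limit_n (colored_block_counting limit_n)

def Claim_raises_colored_block_counting : Prop :=
  (∀ (limit_n : Int), Dom_colored_block_counting limit_n →
      Raises_colored_block_counting limit_n → ¬ Pre_colored_block_counting limit_n) ∧
  (Dom_colored_block_counting (pvRaiseWitness_colored_block_counting) ∧
   Raises_colored_block_counting (pvRaiseWitness_colored_block_counting) ∧
   colored_block_counting_alt (pvRaiseWitness_colored_block_counting) =
     pvRaiseWitnessOut_colored_block_counting)

-- ===== LEMMAS AND PROOFS =====

-- the state of B's loop after k iterations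
def pvW : Nat → Int × Int × Int × Int
  | 0 => (0, 0, 0, 1)
  | k+1 => pvBStep (pvW k)

-- the tetranacci-style sequence B computes
def pvB (k : Nat) : Int := (pvW k).2.2.2

-- prefix sums of pvB
def pvS : Nat → Int
  | 0 => 0
  | k+1 => pvS k + pvB k

lemma pvFoldl_step (l : List Int) : ∀ (k : Nat),
    l.foldl (fun w _ => pvBStep w) (pvW k) = pvW (k + l.length) := by
  induction l with
  | nil => intro k; simp
  | cons x xs ih =>
    intro k
    have : pvBStep (pvW k) = pvW (k+1) := rfl
    simp only [List.foldl_cons, this, ih, List.length_cons]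
    congr 1
    omega

lemma pvAlt_eq (limit_n : Int) :
    colored_block_counting_alt limit_n = pvB limit_n.toNat := by
  unfold colored_block_counting_alt pvB
  have h0 : ((0,0,0,1) : Int × Int × Int × Int) = pvW 0 := rfl
  rw [h0, pvFoldl_step]
  simp [PySem.List.length_pyRange_one]

lemma pvW3 (k : Nat) : (pvW (k+1)).2.2.1 = pvB k := rfl
lemma pvW2 (k : Nat) : (pvW (k+2)).2.1 = pvB k := rfl
lemma pvB_succ (k : Nat) :
    pvB (k+1) = (pvW k).1 + (pvW k).2.1 + (pvW k).2.2.1 + pvB k := rfl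

-- (pvW k).2.1 + (pvW k).2.2.1 + pvS (k-2) = pvS k   (Nat subtraction)
lemma pvL (k : Nat) : (pvW k).2.1 + (pvW k).2.2.1 + pvS (k - 2) = pvS k := by
  match k with
  | 0 => decide
  | 1 => decide
  | (m+2) =>
    have h2 : (pvW (m+2)).2.1 = pvB m := pvW2 m
    have h3 : (pvW (m+2)).2.2.1 = pvB (m+1) := pvW3 (m+1)
    have : m + 2 - 2 = m := by omega
    rw [h2, h3, this]
    show pvB m + pvB (m+1) + pvS m = pvS (m+2)
    simp only [pvS]
    omega

-- key identity: pvB (k+1) = 1 + pvS k + pvS (k-1) + pvS (k-2)   (Nat subtraction)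
lemma pvKey : ∀ (k : Nat), pvB (k+1) = 1 + pvS k + pvS (k - 1) + pvS (k - 2) := by
  intro k
  induction k with
  | zero => decide
  | succ k ih =>
    have hrec : pvB (k+2) = (pvW (k+1)).1 + (pvW (k+1)).2.1 + (pvW (k+1)).2.2.1 + pvB (k+1) :=
      pvB_succ (k+1)
    have hsh1 : (pvW (k+1)).1 = (pvW k).2.1 := rfl
    have hsh2 : (pvW (k+1)).2.1 = (pvW k).2.2.1 := rfl
    have hsh3 : (pvW (k+1)).2.2.1 = pvB k := pvW3 k
    have hL : (pvW k).2.1 + (pvW k).2.2.1 + pvS (k - 2) = pvS k := pvL k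
    have e1 : k + 1 - 1 = k := by omega
    have e2 : k + 1 - 2 = k - 1 := by omega
    rw [e1, e2]
    have hS1 : pvS (k+1) = pvS k + pvB k := rfl
    rw [hrec, hsh1, hsh2, hsh3, ih, hS1]
    omega

-- the dict invariant A's loop maintains
def pvInv (n : Int) (d : PySem.Dict Int Int) : Prop :=
  ∀ m : Int, 2 ≤ m → m < n → d.getD m 0 = pvB m.toNat - 1

-- one inner `for idx` loop, last j indices of the range, adds pvS j
lemma pvInnerFold (n block : Int) (d : PySem.Dict Int Int)
    (hb : 2 ≤ block) (H : pvInv n d) :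
    ∀ (j : Nat) (c : Int), (j : Int) ≤ n - block + 1 →
      (PySem.List.pyRange (n - block + 1 - j) (n - block + 1) 1).foldl
        (fun counter idx =>
          let counter := counter + 1
          if n - (block + idx) ≥ 2 then counter + d.getD (n - (block + idx)) 0
          else counter) c = c + pvS j := by
  intro j
  induction j with
  | zero =>
    intro c _
    rw [PySem.List.pyRange_one_eq_nil (by omega)]
    simp [pvS]
  | succ j ih =>
    intro c hj
    have hcast : ((j : Int) + 1) ≤ n - block + 1 := by push_cast at hj ⊢; omega
    rw [PySem.List.pyRange_one_cons (by omega)]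
    simp only [List.foldl_cons]
    have hidx : n - (block + (n - block + 1 - ((j : Int) + 1))) = (j : Int) := by omega
    have hstep : n - block + 1 - ((j : Int) + 1) + 1 = n - block + 1 - (j : Int) := by
      omega
    push_cast
    rw [hidx, hstep]
    by_cases hj2 : (2 : Int) ≤ (j : Int)
    · have hjn : (j : Int) < n := by omega
      have hd : d.getD (j : Int) 0 = pvB (j : Int).toNat - 1 := H _ hj2 hjn
      have htn : ((j : Int)).toNat = j := by omega
      rw [if_pos (by omega), hd, htn, ih _ (by omega)]
      have : pvS (j+1) = pvS j + pvB j := rfl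
      omega
    · rw [if_neg (by omega), ih _ (by omega)]
      have hb01 : pvB j = 1 := by
        have hj01 : j = 0 ∨ j = 1 := by omega
        rcases hj01 with h | h <;> subst h <;> decide
      have : pvS (j+1) = pvS j + pvB j := rfl
      omega

-- the full inner loop for one block size
lemma pvInnerFull (n block : Int) (d : PySem.Dict Int Int)
    (hb : 2 ≤ block) (H : pvInv n d) (c : Int) :
    (PySem.List.pyRange 0 (n - block + 1) 1).foldl
      (fun counter idx =>
        let counter := counter + 1
        if n - (block + idx) ≥ 2 then counter + d.getD (n - (block + idx)) 0
        else counter) c = c + pvS (n - block + 1).toNat := by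
  by_cases hL : n - block + 1 ≤ 0
  · rw [PySem.List.pyRange_one_eq_nil hL]
    have : (n - block + 1).toNat = 0 := by omega
    simp [this, pvS]
  · have hj : ((n - block + 1).toNat : Int) ≤ n - block + 1 := by omega
    have h := pvInnerFold n block d hb H (n - block + 1).toNat c hj
    rw [show n - block + 1 - ((n - block + 1).toNat : Int) = (0 : Int) from by omega] at h
    exact h

lemma pvRange25 : PySem.List.pyRange 2 5 1 = [2, 3, 4] := by decide

lemma pvAInner_eq (n : Int) (d : PySem.Dict Int Int) (hn : 1 ≤ n) (H : pvInv n d) :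
    pvAInner n d = pvB n.toNat := by
  unfold pvAInner
  rw [pvRange25]
  simp only [List.foldl_cons, List.foldl_nil]
  rw [pvInnerFull n 2 d (by omega) H, pvInnerFull n 3 d (by omega) H,
      pvInnerFull n 4 d (by omega) H]
  obtain ⟨k, hk⟩ : ∃ k, n.toNat = k + 1 := ⟨n.toNat - 1, by omega⟩
  have e1 : (n - 2 + 1).toNat = k := by omega
  have e2 : (n - 3 + 1).toNat = k - 1 := by omega
  have e3 : (n - 4 + 1).toNat = k - 2 := by omega
  rw [e1, e2, e3, hk, pvKey k]

lemma pvLoop_eq : ∀ (fuel : Nat) (n : Int) (d : PySem.Dict Int Int) (c : Int),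
    1 ≤ n → pvInv n d →
    pvALoop (fuel + 1) n d c = pvB (n + (fuel : Int)).toNat := by
  intro fuel
  induction fuel with
  | zero =>
    intro n d c hn H
    show pvAInner n d = pvB (n + (0:Int)).toNat
    rw [pvAInner_eq n d hn H]
    norm_num
  | succ fuel ih =>
    intro n d c hn H
    show pvALoop (fuel + 1) (n + 1) (d.insert n (pvAInner n d - 1)) (pvAInner n d)
        = pvB (n + (↑(fuel+1) : Int)).toNat
    have Hnext : pvInv (n + 1) (d.insert n (pvAInner n d - 1)) := by
      intro m hm2 hmlt
      rw [PySem.Dict.getD_insert]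
      by_cases hmn : m = n
      · rw [if_pos hmn, hmn, pvAInner_eq n d hn H]
      · rw [if_neg hmn]
        exact H m hm2 (by omega)
    rw [ih (n + 1) _ _ (by omega) Hnext]
    congr 1
    push_cast
    omega

-- ===== VERDICT (by name: the statement is the Claim_ definition above) =====
theorem colored_block_counting_spec : Claim_equal_colored_block_counting := by
  intro limit_n _ hpre
  show colored_block_counting limit_n = colored_block_counting_alt limit_n
  unfold colored_block_counting
  have hpre' : (1 : Int) ≤ limit_n := hpre
  have hfuel : limit_n.toNat = (limit_n.toNat - 1) + 1 := by omega
  rw [hfuel, pvLoop_eq (limit_n.toNat - 1) 1 PySem.Dict.empty 0 (by omega)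
      (fun m hm2 hmlt => absurd (lt_of_le_of_lt hm2 hmlt) (by omega)), pvAlt_eq]
  congr 1
  omega

@[simp] theorem colored_block_counting_raises : Claim_raises_colored_block_counting := by
  unfold Claim_raises_colored_block_counting
  constructor
  · intro limit_n _ hr hp
    exact absurd hp (by unfold Pre_colored_block_counting Raises_colored_block_counting at *; omega)
  · exact ⟨by decide, by decide, by decide⟩
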